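-- pv_equiv track=rewrite | github.com/chenxy3791/algorithm_puzzles | Q21-xor-yanghui.py | xor_yanghui1
-- ===== SOURCE A (Python) =====
-- def xor_yanghui1(N:int)->int:
--     """
--     :N:    Specify the serial-number of the zero to be searched
--     :
--     :ret:  return the layer count
--     """
--
--     zeroCnt   = 0
--     layerCnt  = 1
--     prevLayer = [1]
--     cmpFlg   = 0
--
--     while(1):
--         layerCnt += 1
--         curLayer  = []  # Initialize the current layer to one empty list
--         for k in range(len(prevLayer)-1):
--             newData = (prevLayer[k]+prevLayer[k+1])%2
--             curLayer.append(newData)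
--             if newData==0:
--                 zeroCnt += 1
--                 if zeroCnt == N:
--                     # Because there are two layer of loop, we need an extra flag to indicate to
--                     # exit from the outer layer of loop too.
--                     cmpFlg = 1
--                     break
--
--         if cmpFlg == 1:
--             break
--         else:
--             # Update prevLayer for the computation of the next layer, by appending the two '1's
--             # in the head and tail.
--             prevLayer = [1] + curLayer + [1]
--
--     return layerCnt
-- ===== SOURCE B (Python) =====
-- def xor_yanghui1(N: int) -> int:
--     # Each Pascal-mod-2 row is kept as a single bitmask; one row step is
--     # row ^= row << 1, and a layer's zeros are counted wholesale as
--     # layer - row.bit_count() instead of element by element.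
--     row = 1      # bitmask of layer 1 (bit i = entry i of the row, mod 2)
--     layer = 1
--     cnt = 0      # zeros seen in layers 1..layer
--     while True:
--         layer += 1
--         row ^= row << 1
--         cnt += layer - row.bit_count()
--         if cnt >= N:
--             return layer
-- ===== Notes on version B (the rewrite author's own statement) =====
-- stated objective: faster
-- what changed: B replaces A's per-element list construction of each XOR-Pascal row (with an early-exit nested loop counting zeros one by one) by a single integer bitmask per row, stepped with row ^= row << 1, counting a whole layer's zeros at once as layer - row.bit_count().
-- outside the precondition, e.g. on xor_yanghui1(0): A does not finish within the time limit, B returns 2; on xor_yanghui1(-3): A does not finish within the time limit, B returns 2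
import Mathlib
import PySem

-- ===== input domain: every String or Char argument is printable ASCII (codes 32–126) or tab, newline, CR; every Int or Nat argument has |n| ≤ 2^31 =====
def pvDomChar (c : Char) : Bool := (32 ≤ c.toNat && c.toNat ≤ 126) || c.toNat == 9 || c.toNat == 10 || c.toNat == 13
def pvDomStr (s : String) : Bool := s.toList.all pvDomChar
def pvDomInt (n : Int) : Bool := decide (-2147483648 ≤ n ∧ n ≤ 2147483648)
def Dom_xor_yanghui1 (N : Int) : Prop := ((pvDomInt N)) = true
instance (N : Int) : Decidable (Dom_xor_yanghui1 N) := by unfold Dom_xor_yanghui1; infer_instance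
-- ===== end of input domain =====

-- B replaces A's per-element list construction of each XOR-Pascal row by one integer
-- bitmask per row (row ^= row << 1), counting a layer's zeros wholesale via popcount
-- (objective: faster by the word-parallel bigint mechanism, as measured).

-- ===== PORT A =====
-- inner 'for k in range(len(prevLayer)-1)' loop: walks adjacent pairs, appends
-- (prevLayer[k]+prevLayer[k+1])%2, counts zeros one by one, breaks (flag true)
-- the moment zeroCnt == N.  Returns (curLayer, zeroCnt, cmpFlg).
def pvInnerA (N : Int) : List Int → Int → (List Int × Int × Bool)
  | a :: b :: rest, zeroCnt =>
      let newData := PySem.Int.mod (a + b) 2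
      if newData = 0 then
        if zeroCnt + 1 = N then ([newData], zeroCnt + 1, true)
        else
          let r := pvInnerA N (b :: rest) (zeroCnt + 1)
          (newData :: r.1, r.2)
      else
        let r := pvInnerA N (b :: rest) zeroCnt
        (newData :: r.1, r.2)
  | _, zeroCnt => ([], zeroCnt, false)

-- outer 'while(1)' loop; the fuel only makes the recursion total (it is ample for
-- every N admitted by Pre_, where the Python terminates) and is never hit there.
def pvLoopA (N : Int) : Nat → Int → Int → List Int → Int
  | 0, _, layerCnt, _ => layerCnt
  | fuel + 1, zeroCnt, layerCnt, prevLayer =>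
      let r := pvInnerA N prevLayer zeroCnt
      if r.2.2 then layerCnt + 1
      else pvLoopA N fuel r.2.1 (layerCnt + 1) ((1 :: r.1) ++ [1])

def xor_yanghui1 (N : Int) : Int := pvLoopA N (2 * N.toNat + 4) 0 1 [1]

-- ===== PORT B =====
-- port of Python's int.bit_count() (number of 1 bits)
def pvPopCount (m : Nat) : Nat :=
  if h : m = 0 then 0 else m % 2 + pvPopCount (m / 2)
decreasing_by exact Nat.div_lt_self (Nat.pos_of_ne_zero h) one_lt_two

-- 'while True' loop of Source B; same totalising fuel remark as for A's loop.
def pvLoopB (N : Int) : Nat → Nat → Int → Int → Int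
  | 0, _, layer, _ => layer
  | fuel + 1, row, layer, cnt =>
      let row' := row ^^^ (row <<< 1)
      let cnt' := cnt + ((layer + 1) - (pvPopCount row' : Int))
      if N ≤ cnt' then layer + 1 else pvLoopB N fuel row' (layer + 1) cnt'

def xor_yanghui1_alt (N : Int) : Int := pvLoopB N (2 * N.toNat + 4) 1 1 0

-- ===== PRECONDITION & SPEC =====
-- For N ≤ 0 the Python A never returns (zeroCnt starts at 0 and only grows, so
-- 'zeroCnt == N' never fires): those inputs are excluded; A returns on all N ≥ 1.
def Pre_xor_yanghui1 (N : Int) : Prop := 1 ≤ N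
instance (N : Int) : Decidable (Pre_xor_yanghui1 N) := by unfold Pre_xor_yanghui1; infer_instance
def pvWitness_xor_yanghui1 : Int := 3

def Spec_xor_yanghui1 (N : Int) (out : Int) : Prop := out = xor_yanghui1_alt N
instance (N : Int) (out : Int) : Decidable (Spec_xor_yanghui1 N out) := by unfold Spec_xor_yanghui1; infer_instance

-- ===== CLAIM (what is proved, stated in full; the proofs are below) =====
def Claim_equal_xor_yanghui1 : Prop := ∀ (N : Int), Dom_xor_yanghui1 N → Pre_xor_yanghui1 N → Spec_xor_yanghui1 N (xor_yanghui1 N)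

-- ===== LEMMAS AND PROOFS =====

-- the list of bits of n, LSB first (length = n.size); A's row lists are exactly these
def pvBits (n : Nat) : List Int := (List.range n.size).map (fun i => if n.testBit i then 1 else 0)

-- the interior of the next row as A builds it: adjacent sums mod 2
def pvIntr : List Int → List Int
  | a :: b :: rest => PySem.Int.mod (a + b) 2 :: pvIntr (b :: rest)
  | _ => []

lemma pvIntr_length (l : List Int) : (pvIntr l).length = l.length - 1 := by
  induction l with
  | nil => simp [pvIntr]
  | cons a t ih =>
    cases t with
    | nil => simp [pvIntr]
    | cons b r => simp [pvIntr] at *; omega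

lemma pvIntr_getElem (l : List Int) (j : Nat) (hj : j + 1 < l.length)
    (hj' : j < (pvIntr l).length) :
    (pvIntr l)[j] = PySem.Int.mod (l[j] + l[j + 1]) 2 := by
  induction l generalizing j with
  | nil => simp at hj
  | cons a t ih =>
    cases t with
    | nil => simp at hj
    | cons b r =>
      cases j with
      | zero => rfl
      | succ j' =>
        have h1 : j' + 1 < (b :: r).length := by simpa using hj
        have h2 : j' < (pvIntr (b :: r)).length := by
          rw [pvIntr_length]; simp at hj ⊢; omega
        simpa [pvIntr] using ih j' h1 h2

lemma pvBits_length (n : Nat) : (pvBits n).length = n.size := by simp [pvBits]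

lemma pvBits_getElem (n i : Nat) (h : i < (pvBits n).length) :
    (pvBits n)[i] = if n.testBit i then 1 else 0 := by
  simp [pvBits]

lemma pvBits_mem (n : Nat) (x : Int) (hx : x ∈ pvBits n) : x = 0 ∨ x = 1 := by
  simp [pvBits] at hx
  obtain ⟨i, -, hi⟩ := hx
  by_cases h : n.testBit i <;> simp [h] at hi <;> omega

lemma testBit_top (n : Nat) (h : n ≠ 0) : n.testBit (n.size - 1) = true := by
  have hs : 0 < n.size := Nat.lt_size.mpr (by simpa using Nat.pos_of_ne_zero h)
  have hle : 2 ^ (n.size - 1) ≤ n := Nat.lt_size.mp (by omega)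
  have hlt : n < 2 ^ n.size := Nat.lt_size_self n
  have hexp : 2 ^ (n.size - 1) * 2 = 2 ^ n.size := by
    rw [← pow_succ]; congr 1; omega
  have hdiv : n / 2 ^ (n.size - 1) = 1 := by
    have h1 : 1 ≤ n / 2 ^ (n.size - 1) :=
      (Nat.one_le_div_iff (Nat.pos_of_ne_zero (by positivity))).mpr hle
    have h2 : n / 2 ^ (n.size - 1) < 2 := Nat.div_lt_of_lt_mul (by omega)
    omega
  rw [Nat.testBit_eq_decide_div_mod_eq, hdiv]
  decide

lemma ge_of_testBit (n i : Nat) (h : n.testBit i = true) : 2 ^ i ≤ n := by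
  by_contra hc
  rw [Nat.testBit_lt_two_pow (by omega)] at h
  exact Bool.false_ne_true h

-- the top and bottom bits of the next-row mask
lemma step_odd (n : Nat) (h : n % 2 = 1) : (n ^^^ (n <<< 1)) % 2 = 1 := by
  have h0 : (n ^^^ (n <<< 1)).testBit 0 = true := by
    rw [Nat.testBit_xor, Nat.testBit_shiftLeft]
    simp [Nat.testBit_zero, h]
  rw [Nat.testBit_zero] at h0
  simpa using h0

lemma size_step (n : Nat) (h : n % 2 = 1) : (n ^^^ (n <<< 1)).size = n.size + 1 := by
  have hn0 : n ≠ 0 := by omega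
  set s := n.size with hs
  have hs1 : 0 < s := Nat.lt_size.mpr (by simpa using Nat.pos_of_ne_zero hn0)
  have htop : (n ^^^ (n <<< 1)).testBit s = true := by
    rw [Nat.testBit_xor, Nat.testBit_shiftLeft]
    have h1 : n.testBit s = false := Nat.testBit_lt_two_pow (Nat.lt_size_self n)
    have h2 : n.testBit (s - 1) = true := testBit_top n hn0
    have h3 : decide (1 ≤ s) = true := by simp; omega
    rw [h1, h3, h2]
    rfl
  have hn2 : n < 2 ^ s := Nat.lt_size_self n
  have hexp : 2 ^ (s + 1) = 2 ^ s * 2 := by rw [← pow_succ]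
  have hub : n ^^^ (n <<< 1) < 2 ^ (s + 1) := by
    have h1 : n < 2 ^ (s + 1) := by omega
    have h2 : n <<< 1 < 2 ^ (s + 1) := by
      rw [Nat.shiftLeft_eq, pow_one]
      omega
    exact Nat.xor_lt_two_pow h1 h2
  have hlb : 2 ^ s ≤ n ^^^ (n <<< 1) := ge_of_testBit _ _ htop
  have hle : (n ^^^ (n <<< 1)).size ≤ s + 1 := Nat.size_le.mpr hub
  have hge : s < (n ^^^ (n <<< 1)).size := Nat.lt_size.mpr hlb
  omega

-- the next-row bitmask is exactly [1] + interior + [1] of A's list row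
lemma bits_step (n : Nat) (h : n % 2 = 1) :
    pvBits (n ^^^ (n <<< 1)) = (1 :: pvIntr (pvBits n)) ++ [1] := by
  have hn0 : n ≠ 0 := by omega
  set s := n.size with hs
  have hs1 : 0 < s := Nat.lt_size.mpr (by simpa using Nat.pos_of_ne_zero hn0)
  have hsz : (n ^^^ (n <<< 1)).size = s + 1 := size_step n h
  have hlenL : (pvBits (n ^^^ (n <<< 1))).length = s + 1 := by rw [pvBits_length, hsz]
  have hintr : (pvIntr (pvBits n)).length = s - 1 := by rw [pvIntr_length, pvBits_length]
  have hlenR : ((1 :: pvIntr (pvBits n)) ++ [1]).length = s + 1 := by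
    simp [hintr]; omega
  apply List.ext_getElem (by omega)
  intro i hi1 hi2
  have hi : i < s + 1 := by rw [hlenL] at hi1; exact hi1
  rw [pvBits_getElem _ _ hi1]
  have hbitL : (n ^^^ (n <<< 1)).testBit i = ((n.testBit i) ^^ (decide (1 ≤ i) && n.testBit (i - 1))) := by
    rw [Nat.testBit_xor, Nat.testBit_shiftLeft]
  rcases Nat.eq_zero_or_pos i with h0 | hpos
  · subst h0
    simp [hbitL, Nat.testBit_zero, h]
  · have : ((1 :: pvIntr (pvBits n)) ++ [1])[i] = (pvIntr (pvBits n) ++ [1])[i - 1]'(by rw [List.length_append, hintr]; simp; omega) := by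
      cases i with
      | zero => omega
      | succ k => simp
    rw [this]
    by_cases hmid : i - 1 < s - 1
    · rw [List.getElem_append_left (by omega : i - 1 < (pvIntr (pvBits n)).length)]
      have hj1 : (i - 1) + 1 < (pvBits n).length := by rw [pvBits_length]; omega
      rw [pvIntr_getElem _ _ hj1 (by omega)]
      have e1 : (pvBits n)[i - 1]'(by rw [pvBits_length]; omega) = if n.testBit (i - 1) then 1 else 0 :=
        pvBits_getElem _ _ _
      have hi1' : (i - 1) + 1 = i := by omega
      have e2 : (pvBits n)[(i - 1) + 1]'(by rw [pvBits_length]; omega) = if n.testBit i then 1 else 0 := by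
        rw [pvBits_getElem, hi1']
      rw [e1, e2, hbitL]
      have : decide (1 ≤ i) = true := by simp; omega
      rw [this]
      by_cases b1 : n.testBit (i - 1) <;> by_cases b2 : n.testBit i <;>
        simp [b1, b2]
    · -- i = s : the appended trailing 1
      have his : i = s := by omega
      subst his
      rw [List.getElem_append_right (by omega : (pvIntr (pvBits n)).length ≤ s - 1)]
      have h1 : n.testBit s = false := Nat.testBit_lt_two_pow (Nat.lt_size_self n)
      have h2 : n.testBit (s - 1) = true := testBit_top n hn0
      have h3 : decide (1 ≤ s) = true := by simp; omega
      rw [hbitL, h1, h3, h2]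
      simp [hintr]

lemma popCount_eq (n : Nat) : pvPopCount n = (pvBits n).count 1 := by
  induction n using Nat.strong_induction_on with
  | _ n ih =>
    rcases Nat.eq_zero_or_pos n with h0 | hpos
    · subst h0
      rw [pvPopCount]
      simp [pvBits, Nat.size_zero]
    · have hcons : pvBits n = (if n % 2 = 1 then (1 : Int) else 0) :: pvBits (n / 2) := by
        have hsz : n.size = (n / 2).size + 1 := by
          have h1 : n.size ≤ (n / 2).size + 1 := by
            rw [Nat.size_le, pow_succ]
            have : n / 2 < 2 ^ (n / 2).size := Nat.lt_size_self _
            omega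
          have h2 : (n / 2).size ≤ n.size - 1 := by
            rw [Nat.size_le]
            have hpos' : 0 < n.size := Nat.lt_size.mpr (by simpa using hpos)
            have : n < 2 ^ n.size := Nat.lt_size_self n
            have hexp : 2 ^ n.size = 2 ^ (n.size - 1) * 2 := by
              rw [← pow_succ]; congr 1; omega
            omega
          have hpos' : 0 < n.size := Nat.lt_size.mpr (by simpa using hpos)
          omega
        apply List.ext_getElem
        · simp [pvBits_length, hsz]
        · intro i hi1 hi2
          cases i with
          | zero =>
            rw [pvBits_getElem _ _ hi1]
            simp [Nat.testBit_zero]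
          | succ i' =>
            rw [pvBits_getElem _ _ hi1]
            have : (n / 2).testBit i' = n.testBit (i' + 1) := (Nat.testBit_add_one n i').symm
            simp only [List.getElem_cons_succ]
            rw [pvBits_getElem _ _ (by simpa [pvBits_length, hsz] using hi1), this]
      rw [pvPopCount, dif_neg (Nat.pos_iff_ne_zero.mp hpos), hcons, List.count_cons,
        ih (n / 2) (Nat.div_lt_self hpos one_lt_two)]
      by_cases hm : n % 2 = 1
      · simp [hm]
        omega
      · have hm0 : n % 2 = 0 := by omega
        simp [hm0]

lemma count_zero_one (l : List Int) (h : ∀ x ∈ l, x = 0 ∨ x = 1) :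
    l.count 0 + l.count 1 = l.length := by
  induction l with
  | nil => simp
  | cons a t ih =>
    have ha := h a (by simp)
    have ht := ih (fun x hx => h x (by simp [hx]))
    rcases ha with h0 | h1 <;> subst_vars <;>
      simp <;> omega

-- behaviour of A's inner loop: with zeroCnt < N it either finishes the whole
-- interior (flag false, exact count added) or breaks exactly when the running
-- count reaches N
lemma innerA_spec (N : Int) (l : List Int) (z : Int) (hz : z < N) :
    if N ≤ z + ((pvIntr l).count 0 : Int)
    then (pvInnerA N l z).2.2 = true
    else pvInnerA N l z = (pvIntr l, z + ((pvIntr l).count 0 : Int), false) := by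
  induction l generalizing z with
  | nil =>
    rw [if_neg (by simp [pvIntr]; omega)]
    simp [pvInnerA, pvIntr]
  | cons a t ih =>
    cases t with
    | nil =>
      rw [if_neg (by simp [pvIntr]; omega)]
      simp [pvInnerA, pvIntr]
    | cons b r =>
      have hunf : pvInnerA N (a :: b :: r) z =
          (if PySem.Int.mod (a + b) 2 = 0 then
            if z + 1 = N then ([PySem.Int.mod (a + b) 2], z + 1, true)
            else (PySem.Int.mod (a + b) 2 :: (pvInnerA N (b :: r) (z + 1)).1,
                  (pvInnerA N (b :: r) (z + 1)).2)
          else (PySem.Int.mod (a + b) 2 :: (pvInnerA N (b :: r) z).1,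
                (pvInnerA N (b :: r) z).2)) := rfl
      have hintr : pvIntr (a :: b :: r) = PySem.Int.mod (a + b) 2 :: pvIntr (b :: r) := rfl
      set c := ((pvIntr (b :: r)).count 0 : Int) with hc
      have hc0 : 0 ≤ c := by positivity
      by_cases h0 : PySem.Int.mod (a + b) 2 = 0
      · have hcount : ((pvIntr (a :: b :: r)).count 0 : Int) = c + 1 := by
          rw [hintr, List.count_cons, h0]
          simp
          omega
        rw [hunf, if_pos h0, hcount]
        by_cases hN : z + 1 = N
        · rw [if_pos hN, if_pos (by omega)]
        · have hz1 : z + 1 < N := by omega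
          have := ih (z + 1) hz1
          rw [if_neg hN]
          by_cases hrec : N ≤ z + 1 + c
          · rw [if_pos hrec] at this
            rw [if_pos (by omega)]
            simpa using this
          · rw [if_neg hrec] at this
            rw [if_neg (by omega), this, hintr, h0]
            simp
            ring
      · have hcount : ((pvIntr (a :: b :: r)).count 0 : Int) = c := by
          rw [hintr, List.count_cons]
          have hbe : (PySem.Int.mod (a + b) 2 == (0:Int)) = false := by
            simpa using h0
          rw [hbe]
          simpa using hc.symm
        rw [hunf, if_neg h0, hcount]
        have := ih z hz
        by_cases hrec : N ≤ z + c
        · rw [if_pos hrec] at this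
          rw [if_pos (by omega)]
          simpa using this
        · rw [if_neg hrec] at this
          rw [if_neg (by omega), this, hintr]

-- lockstep: with matching states, one outer iteration of A equals one of B
lemma lockstep (N : Int) (fuel : Nat) :
    ∀ (row : Nat) (layer cnt : Int),
      row % 2 = 1 → layer = (row.size : Int) → cnt < N →
      pvLoopA N fuel cnt layer (pvBits row) = pvLoopB N fuel row layer cnt := by
  induction fuel with
  | zero => intro row layer cnt _ _ _; rfl
  | succ fuel ih =>
    intro row layer cnt hodd hlayer hcnt
    set row' := row ^^^ (row <<< 1) with hrow'
    have hstep := bits_step row hodd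
    have hodd' : row' % 2 = 1 := step_odd row hodd
    have hsz' : (row'.size : Int) = layer + 1 := by
      rw [size_step row hodd, hlayer]; push_cast; ring
    -- zero/one counting on the new row
    have hmem : ∀ x ∈ pvBits row', x = 0 ∨ x = 1 := pvBits_mem row'
    have hmemI : ∀ x ∈ pvIntr (pvBits row), x = 0 ∨ x = 1 := by
      intro x hx
      exact hmem x (by rw [hstep]; simp [hx])
    have hcountI := count_zero_one _ hmemI
    have hpop : pvPopCount row' = (pvIntr (pvBits row)).count 1 + 2 := by
      rw [popCount_eq, hstep]
      simp [List.count_append]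
    have hsize1 : 0 < row.size := Nat.lt_size.mpr (by simp; omega)
    have hlenI : (pvIntr (pvBits row)).length = row.size - 1 := by
      rw [pvIntr_length, pvBits_length]
    have hZ : ((pvIntr (pvBits row)).count 0 : Int) = (layer + 1) - (pvPopCount row' : Int) := by
      rw [hpop, hlayer]
      have := hcountI
      rw [hlenI] at this
      push_cast
      omega
    have hspec := innerA_spec N (pvBits row) cnt hcnt
    have hZ' := hZ
    rw [hrow'] at hZ'
    simp only [pvLoopA, pvLoopB]
    by_cases hbr : N ≤ cnt + ((pvIntr (pvBits row)).count 0 : Int)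
    · rw [if_pos hbr] at hspec
      rw [hspec, if_pos rfl, if_pos (by omega)]
    · rw [if_neg hbr] at hspec
      rw [hspec]
      dsimp only
      rw [if_neg (by simp), if_neg (by omega)]
      rw [← hstep]
      have e : cnt + (layer + (1 : Int) - (pvPopCount (row ^^^ row <<< 1) : Int))
          = cnt + ((pvIntr (pvBits row)).count 0 : Int) := by omega
      rw [e]
      exact ih (row ^^^ row <<< 1) (layer + 1) (cnt + ((pvIntr (pvBits row)).count 0 : Int))
        (hrow' ▸ hodd') (by rw [← hrow', hsz']) (by omega)

-- ===== VERDICT (by name: the statement is the Claim_ definition above) =====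
theorem xor_yanghui1_spec : Claim_equal_xor_yanghui1 := by
  intro N _ hpre
  unfold Spec_xor_yanghui1 xor_yanghui1 xor_yanghui1_alt
  have h1 : pvBits 1 = [1] := by decide
  have h2 : ((1 : Nat).size : Int) = 1 := by decide
  rw [← h1]
  exact lockstep N (2 * N.toNat + 4) 1 1 0 (by decide) h2.symm (by exact hpre)
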